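-- pv_equiv track=rewrite | github.com/creditimpact/finance-platform | backend/ai/note_style/parse.py | _extract_longest_object
-- ===== SOURCE A (Python) =====
-- def _extract_longest_object(text: str) -> str | None:
--     start_stack: list[int] = []
--     best_span: tuple[int, int] | None = None
--     for index, char in enumerate(text):
--         if char == "{":
--             start_stack.append(index)
--         elif char == "}" and start_stack:
--             start = start_stack.pop()
--             if not start_stack:
--                 span = (start, index + 1)
--                 if best_span is None or (span[1] - span[0]) > (best_span[1] - best_span[0]):
--                     best_span = span
--     if best_span is None:
--         return None
--     candidate = text[best_span[0] : best_span[1]].strip()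
--     return candidate or None
-- ===== SOURCE B (Python) =====
-- def _matching_end(text, start):
--     """Index one past the '}' matching the '{' at `start`, or None if unbalanced."""
--     depth = 0
--     for j in range(start, len(text)):
--         char = text[j]
--         if char == "{":
--             depth += 1
--         elif char == "}":
--             depth -= 1
--             if depth == 0:
--                 return j + 1
--     return None
--
--
-- def _extract_longest_object(text: str) -> str | None:
--     # Recursive-descent skipper: jump from one top-level '{' straight to its
--     # matching '}' and on to the next top-level '{' via str.find, instead of
--     # driving a stack machine over every character.
--     best = None
--     i = text.find("{")
--     while i != -1:
--         end = _matching_end(text, i)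
--         if end is None:
--             break
--         if best is None or end - i > best[1] - best[0]:
--             best = (i, end)
--         i = text.find("{", end)
--     if best is None:
--         return None
--     return text[best[0]:best[1]].strip() or None
-- ===== Notes on version B (the rewrite author's own statement) =====
-- stated objective: alternative
-- what changed: Replaces A's per-character stack machine with interleaved best-update by a recursive-descent skipper: str.find locates each top-level '{', a helper jumps to its matching '}', and the outer loop iterates once per top-level object keeping the strictly longer span.
import Mathlib
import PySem

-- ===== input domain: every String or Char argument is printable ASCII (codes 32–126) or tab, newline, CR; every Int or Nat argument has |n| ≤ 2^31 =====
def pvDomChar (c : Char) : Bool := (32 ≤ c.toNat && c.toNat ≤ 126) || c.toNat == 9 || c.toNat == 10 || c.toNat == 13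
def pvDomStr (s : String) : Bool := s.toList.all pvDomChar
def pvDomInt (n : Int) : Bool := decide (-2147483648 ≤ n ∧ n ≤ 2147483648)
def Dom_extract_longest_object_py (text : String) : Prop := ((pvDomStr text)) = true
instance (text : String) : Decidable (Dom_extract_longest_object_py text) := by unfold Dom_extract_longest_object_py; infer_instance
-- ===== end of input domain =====

-- B replaces A's per-character stack machine by a recursive-descent skipper (find next
-- top-level '{', jump to its matching '}'); same O(n) cost, different loop structure.

-- ===== PORT A =====
-- state: (stack of '{' indices — pushed at the head, popped from the head —, best span so far)
def pvAStep (st : List Int × Option (Int × Int)) (p : Int × Char) : List Int × Option (Int × Int) :=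
  if p.2 = '{' then (p.1 :: st.1, st.2)
  else if p.2 = '}' ∧ st.1 ≠ [] then
    match st.1 with
    | [] => st
    | start :: rest =>
      if rest = [] then
        (rest,
          match st.2 with
          | none => some (start, p.1 + 1)
          | some b => if (p.1 + 1) - start > b.2 - b.1 then some (start, p.1 + 1) else some b)
      else (rest, st.2)
  else st

def extract_longest_object_py (text : String) : Option String :=
  let r := (PySem.List.enumerate text.toList 0).foldl pvAStep ([], none)
  match r.2 with
  | none => none
  | some bs =>
    let candidate := PySem.Str.strip (PySem.Str.slice text (some bs.1) (some bs.2))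
    if candidate = "" then none else some candidate

-- ===== PORT B =====
-- _matching_end's scan 'for j in range(start, len(text))', run over the suffix text[start:]
-- with j carried explicitly (depth checked, as in the Python, after the decrement)
def pvMatchLoop : List Char → Nat → Int → Option Nat
  | [], _, _ => none
  | c :: rest, j, depth =>
    if c = '{' then pvMatchLoop rest (j + 1) (depth + 1)
    else if c = '}' then
      if depth - 1 = 0 then some (j + 1) else pvMatchLoop rest (j + 1) (depth - 1)
    else pvMatchLoop rest (j + 1) depth

def pvMatchingEnd (cs : List Char) (start : Nat) : Option Nat :=
  pvMatchLoop (cs.drop start) start 0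

-- hand port of text.find("{", pos) for the nonnegative positions B passes;
-- Python's -1 sentinel is rendered as none (the while-guard 'i != -1' becomes a match)
def pvFindLoop : List Char → Nat → Option Nat
  | [], _ => none
  | c :: rest, j => if c = '{' then some j else pvFindLoop rest (j + 1)

def pvFindOpen (cs : List Char) (pos : Nat) : Option Nat :=
  pvFindLoop (cs.drop pos) pos

-- bounds used only for termination of the outer loop
lemma pvMatchLoop_bounds : ∀ (l : List Char) (j : Nat) (d : Int) (e : Nat),
    pvMatchLoop l j d = some e → j < e ∧ e ≤ j + l.length := by
  intro l
  induction l with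
  | nil => intro j d e h; simp [pvMatchLoop] at h
  | cons c rest ih =>
    intro j d e h
    simp only [pvMatchLoop] at h
    split_ifs at h with h1 h2 h3
    · have := ih (j + 1) (d + 1) e h; simp at this ⊢; omega
    · simp at h ⊢; omega
    · have := ih (j + 1) (d - 1) e h; simp at this ⊢; omega
    · have := ih (j + 1) d e h; simp at this ⊢; omega

lemma pvFindLoop_bounds : ∀ (l : List Char) (j : Nat) (r : Nat),
    pvFindLoop l j = some r → j ≤ r ∧ r < j + l.length := by
  intro l
  induction l with
  | nil => intro j r h; simp [pvFindLoop] at h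
  | cons c rest ih =>
    intro j r h
    simp only [pvFindLoop] at h
    split_ifs at h with h1
    · simp at h ⊢; omega
    · have := ih (j + 1) r h; simp at this ⊢; omega

lemma pvMatchingEnd_bounds (cs : List Char) (i e : Nat) (h : pvMatchingEnd cs i = some e) :
    i < e ∧ e ≤ cs.length := by
  have := pvMatchLoop_bounds (cs.drop i) i 0 e h
  simp [List.length_drop] at this
  omega

lemma pvFindOpen_bounds (cs : List Char) (p r : Nat) (h : pvFindOpen cs p = some r) :
    p ≤ r ∧ r < cs.length := by
  have := pvFindLoop_bounds (cs.drop p) p r h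
  simp [List.length_drop] at this
  omega

-- the 'while i != -1' loop of B
def pvOuterLoop (cs : List Char) (i : Option Nat) (best : Option (Nat × Nat)) :
    Option (Nat × Nat) :=
  match i with
  | none => best
  | some i =>
    match hm : pvMatchingEnd cs i with
    | none => best
    | some e =>
      pvOuterLoop cs (pvFindOpen cs e)
        (match best with
         | none => some (i, e)
         | some b => if e - i > b.2 - b.1 then some (i, e) else some b)
termination_by (match i with | none => 0 | some i => cs.length + 1 - i)
decreasing_by
  have h1 := pvMatchingEnd_bounds cs i e hm
  match hf : pvFindOpen cs e with
  | none => simp [hf]; omega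
  | some r =>
    have h2 := pvFindOpen_bounds cs e r hf
    simp [hf]; omega

def extract_longest_object_py_alt (text : String) : Option String :=
  let cs := text.toList
  match pvOuterLoop cs (pvFindOpen cs 0) none with
  | none => none
  | some b =>
    let candidate := PySem.Str.strip (PySem.Str.slice text (some (b.1 : Int)) (some (b.2 : Int)))
    if candidate = "" then none else some candidate

-- ===== PRECONDITION & SPEC =====
def Spec_extract_longest_object_py (text : String) (out : Option String) : Prop := out = extract_longest_object_py_alt text
instance (text : String) (out : Option String) : Decidable (Spec_extract_longest_object_py text out) := by unfold Spec_extract_longest_object_py; infer_instance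

-- ===== CLAIM (what is proved, stated in full; the proofs are below) =====
def Claim_equal_extract_longest_object_py : Prop := ∀ (text : String), Dom_extract_longest_object_py text → Spec_extract_longest_object_py text (extract_longest_object_py text)

-- ===== LEMMAS AND PROOFS =====

-- cast B's Nat span to A's Int span
def pvCast (b : Option (Nat × Nat)) : Option (Int × Int) :=
  b.map (fun p => ((p.1 : Int), (p.2 : Int)))

-- a well-formed best span (B only ever stores spans with start < end)
def pvWF (b : Option (Nat × Nat)) : Prop := ∀ p ∈ b, p.1 < p.2

-- B's best-update step, named for the proofs (definitionally the update inlined in pvOuterLoop)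
def pvUpdB (bB : Option (Nat × Nat)) (i e : Nat) : Option (Nat × Nat) :=
  match bB with
  | none => some (i, e)
  | some b => if e - i > b.2 - b.1 then some (i, e) else some b

lemma pvUpdB_wf (bB : Option (Nat × Nat)) (i e : Nat) (hie : i < e) (hwf : pvWF bB) :
    pvWF (pvUpdB bB i e) := by
  intro p hp
  cases bB with
  | none => simp [pvUpdB] at hp; subst hp; exact hie
  | some m =>
    simp only [pvUpdB] at hp
    split at hp
    · simp at hp; subst hp; exact hie
    · simp at hp; subst hp; exact hwf m (by simp)

lemma pvGetLast?_cons_of_ne_nil {a : Int} {l : List Int} (h : l ≠ []) :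
    (a :: l).getLast? = l.getLast? := by
  cases l with
  | nil => exact absurd rfl h
  | cons b t => exact List.getLast?_cons_cons

-- A's fold skips characters other than '{' while its stack is empty
lemma pvSkip : ∀ (l : List Char) (j : Int) (b : Option (Int × Int)),
    (∀ c ∈ l, c ≠ '{') →
    (PySem.List.enumerate l j).foldl pvAStep ([], b) = ([], b) := by
  intro l
  induction l with
  | nil => intro j b _; simp [PySem.List.enumerate_nil]
  | cons c rest ih =>
    intro j b hall
    have hc : c ≠ '{' := hall c (by simp)
    have hstep : pvAStep ([], b) (j, c) = ([], b) := by
      simp [pvAStep, hc]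
    rw [PySem.List.enumerate_cons, List.foldl_cons, hstep]
    exact ih (j + 1) b (fun x hx => hall x (by simp [hx]))

-- if the matcher never closes, A's stack never empties and best is untouched
lemma pvNoMatch : ∀ (l : List Char) (jn : Nat) (j d : Int) (s : List Int) (b : Option (Int × Int)),
    pvMatchLoop l jn d = none → 1 ≤ d → (s.length : Int) = d →
    ((PySem.List.enumerate l j).foldl pvAStep (s, b)).2 = b := by
  intro l
  induction l with
  | nil => intro jn j d s b _ _ _; simp [PySem.List.enumerate_nil]
  | cons c rest ih =>
    intro jn j d s b hm hd hs
    rw [PySem.List.enumerate_cons, List.foldl_cons]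
    simp only [pvMatchLoop] at hm
    split_ifs at hm with h1 h2 h3
    · -- '{' : push
      have hstep : pvAStep (s, b) (j, c) = (j :: s, b) := by simp [pvAStep, h1]
      rw [hstep]
      exact ih (jn + 1) (j + 1) (d + 1) (j :: s) b hm (by omega) (by simp; omega)
    · -- '}' with d - 1 ≠ 0 : pop, stack stays nonempty
      obtain ⟨s0, s', rfl⟩ : ∃ s0 s', s = s0 :: s' := by
        cases s with
        | nil => simp at hs; omega
        | cons a t => exact ⟨a, t, rfl⟩
      have hs' : s' ≠ [] := by
        intro h; subst h; simp at hs; omega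
      have hstep : pvAStep (s0 :: s', b) (j, c) = (s', b) := by
        simp [pvAStep, h1, h2, hs']
      rw [hstep]
      exact ih (jn + 1) (j + 1) (d - 1) s' b hm (by omega) (by simp at hs ⊢; omega)
    · -- other character : no-op
      have hstep : pvAStep (s, b) (j, c) = (s, b) := by
        simp [pvAStep, h1, h2]
      rw [hstep]
      exact ih (jn + 1) (j + 1) d s b hm hd hs

-- across a matched segment, A pops back to the empty stack exactly at e and
-- updates best by the same strict-> rule
lemma pvSeg : ∀ (l : List Char) (j : Nat) (d : Int) (s : List Int) (b : Option (Int × Int))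
    (i0 e : Nat),
    pvMatchLoop l j d = some e → 1 ≤ d → (s.length : Int) = d → s.getLast? = some (i0 : Int) →
    ∃ l1 l2, l = l1 ++ l2 ∧ j + l1.length = e ∧
      (PySem.List.enumerate l (j : Int)).foldl pvAStep (s, b) =
        (PySem.List.enumerate l2 (e : Int)).foldl pvAStep
          ([], match b with
               | none => some ((i0 : Int), (e : Int))
               | some m => if (e : Int) - (i0 : Int) > m.2 - m.1
                           then some ((i0 : Int), (e : Int)) else some m) := by
  intro l
  induction l with
  | nil => intro j d s b i0 e hm _ _ _; simp [pvMatchLoop] at hm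
  | cons c rest ih =>
    intro j d s b i0 e hm hd hs hlast
    rw [PySem.List.enumerate_cons, List.foldl_cons]
    simp only [pvMatchLoop] at hm
    split_ifs at hm with h1 h2 h3
    · -- '{' : push
      have hsne : s ≠ [] := by intro h; subst h; simp at hs; omega
      obtain ⟨l1, l2, hl, hlen, hfold⟩ :=
        ih (j + 1) (d + 1) ((j : Int) :: s) b i0 e hm (by omega) (by simp; omega)
          (by rw [pvGetLast?_cons_of_ne_nil hsne]; exact hlast)
      refine ⟨c :: l1, l2, by simp [hl], by simp at hlen ⊢; omega, ?_⟩
      have hstep : pvAStep (s, b) ((j : Int), c) = ((j : Int) :: s, b) := by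
        simp [pvAStep, h1]
      rw [hstep]
      have : ((j : Int) + 1) = ((j + 1 : Nat) : Int) := by push_cast; ring
      rw [this]
      exact hfold
    · -- '}' closing to depth 0 : the span ends here
      simp only [Option.some.injEq] at hm
      have hd1 : d = 1 := by omega
      obtain ⟨s0, s', rfl⟩ : ∃ s0 s', s = s0 :: s' := by
        cases s with
        | nil => simp at hs; omega
        | cons a t => exact ⟨a, t, rfl⟩
      have hs' : s' = [] := by
        cases s' with
        | nil => rfl
        | cons a t => simp [hd1] at hs; omega
      subst hs'
      have hs0 : s0 = (i0 : Int) := by simpa using hlast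
      subst hs0
      refine ⟨[c], rest, by simp, by simp; omega, ?_⟩
      have he : (e : Int) = (j : Int) + 1 := by
        have : e = j + 1 := hm.symm
        subst this; push_cast; ring
      have hstep : pvAStep ((i0 : Int) :: [], b) ((j : Int), c)
          = ([], match b with
                 | none => some ((i0 : Int), (j : Int) + 1)
                 | some m => if (j : Int) + 1 - (i0 : Int) > m.2 - m.1
                             then some ((i0 : Int), (j : Int) + 1) else some m) := by
        cases b with
        | none => simp [pvAStep, h1, h2]
        | some m =>
          by_cases hlt : (j : Int) + 1 - (i0 : Int) > m.2 - m.1 <;>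
            simp [pvAStep, h1, h2, hlt]
      rw [hstep, ← he]
    · -- '}' popping to positive depth
      have hd2 : 2 ≤ d := by omega
      obtain ⟨s0, s', rfl⟩ : ∃ s0 s', s = s0 :: s' := by
        cases s with
        | nil => simp at hs; omega
        | cons a t => exact ⟨a, t, rfl⟩
      have hs' : s' ≠ [] := by
        intro h; subst h; simp at hs; omega
      obtain ⟨l1, l2, hl, hlen, hfold⟩ :=
        ih (j + 1) (d - 1) s' b i0 e hm (by omega) (by simp at hs ⊢; omega)
          (by rw [← pvGetLast?_cons_of_ne_nil (a := s0) hs']; exact hlast)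
      refine ⟨c :: l1, l2, by simp [hl], by simp at hlen ⊢; omega, ?_⟩
      have hstep : pvAStep (s0 :: s', b) ((j : Int), c) = (s', b) := by
        simp [pvAStep, h1, h2, hs']
      rw [hstep]
      have : ((j : Int) + 1) = ((j + 1 : Nat) : Int) := by push_cast; ring
      rw [this]
      exact hfold
    · -- other character : no-op
      obtain ⟨l1, l2, hl, hlen, hfold⟩ :=
        ih (j + 1) d s b i0 e hm hd hs hlast
      refine ⟨c :: l1, l2, by simp [hl], by simp at hlen ⊢; omega, ?_⟩
      have hstep : pvAStep (s, b) ((j : Int), c) = (s, b) := by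
        simp [pvAStep, h1, h2]
      rw [hstep]
      have : ((j : Int) + 1) = ((j + 1 : Nat) : Int) := by push_cast; ring
      rw [this]
      exact hfold

-- pvFindLoop either finds no '{' or splits its list at the first one
lemma pvFindCases : ∀ (l : List Char) (j : Nat),
    (pvFindLoop l j = none ∧ ∀ c ∈ l, c ≠ '{') ∨
    ∃ r l1 l2, pvFindLoop l j = some r ∧ l = l1 ++ '{' :: l2 ∧ (∀ c ∈ l1, c ≠ '{') ∧
      j + l1.length = r := by
  intro l
  induction l with
  | nil => intro j; left; exact ⟨rfl, by simp⟩
  | cons c rest ih =>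
    intro j
    by_cases hc : c = '{'
    · right
      exact ⟨j, [], rest, by simp [pvFindLoop, hc], by simp [hc], by simp, by simp⟩
    · rcases ih (j + 1) with ⟨hn, hall⟩ | ⟨r, l1, l2, hf, hl, hall, hlen⟩
      · left
        refine ⟨by simp [pvFindLoop, hc, hn], ?_⟩
        intro x hx
        rcases List.mem_cons.mp hx with h | h
        · exact h ▸ hc
        · exact hall x h
      · right
        refine ⟨r, c :: l1, l2, by simp [pvFindLoop, hc, hf], by simp [hl], ?_, by simp; omega⟩
        intro x hx
        rcases List.mem_cons.mp hx with h | h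
        · exact h ▸ hc
        · exact hall x h

-- B's update cast to Int is A's update
lemma pvUpd_cast (bB : Option (Nat × Nat)) (i e : Nat) (hie : i < e) (hwf : pvWF bB) :
    (match pvCast bB with
     | none => some ((i : Int), (e : Int))
     | some m => if (e : Int) - (i : Int) > m.2 - m.1
                 then some ((i : Int), (e : Int)) else some m)
      = pvCast (pvUpdB bB i e) := by
  cases bB with
  | none => simp [pvCast, pvUpdB]
  | some m =>
    obtain ⟨x, y⟩ := m
    have hxy : x < y := hwf (x, y) (by simp)
    have hiff : ((e : Int) - (i : Int) > (y : Int) - (x : Int)) ↔ (e - i > y - x) := by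
      omega
    by_cases hgt : e - i > y - x
    · simp [pvCast, pvUpdB, hiff, hgt]
    · simp [pvCast, pvUpdB, hiff, hgt]

-- main invariant: A's fold over the suffix from k equals B's outer loop resumed at k
lemma pvMain : ∀ (n : Nat) (cs : List Char) (k : Nat) (bB : Option (Nat × Nat)),
    cs.length - k ≤ n → pvWF bB →
    ((PySem.List.enumerate (cs.drop k) (k : Int)).foldl pvAStep ([], pvCast bB)).2 =
      pvCast (pvOuterLoop cs (pvFindOpen cs k) bB) := by
  intro n
  induction n with
  | zero =>
    intro cs k bB hn _
    have hk : cs.length ≤ k := by omega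
    have hdrop : cs.drop k = [] := List.drop_eq_nil_of_le hk
    rw [hdrop]
    have hfind : pvFindOpen cs k = none := by
      unfold pvFindOpen; rw [hdrop]; rfl
    rw [hfind, pvOuterLoop]
    simp [PySem.List.enumerate_nil]
  | succ n ih =>
    intro cs k bB hn hwf
    rcases pvFindCases (cs.drop k) k with ⟨hnone, hall⟩ | ⟨r, l1, l2, hf, hsplit, hall1, hlen⟩
    · have hfind : pvFindOpen cs k = none := hnone
      rw [hfind, pvOuterLoop, pvSkip (cs.drop k) (k : Int) (pvCast bB) hall]
    · have hfind : pvFindOpen cs k = some r := hf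
      have hr : r = k + l1.length := by omega
      -- the suffix at r starts with the found '{'
      have hdropr : cs.drop r = '{' :: l2 := by
        have h1 : cs.drop r = (cs.drop k).drop l1.length := by
          rw [List.drop_drop, hr]
        rw [h1, hsplit, List.drop_left]
      have hme : pvMatchingEnd cs r = pvMatchLoop l2 (r + 1) 1 := by
        unfold pvMatchingEnd
        rw [hdropr]
        simp [pvMatchLoop]
      -- A's fold: skip l1, push at r
      have hfold1 :
          (PySem.List.enumerate (cs.drop k) (k : Int)).foldl pvAStep ([], pvCast bB)
            = (PySem.List.enumerate l2 ((r : Int) + 1)).foldl pvAStep ([(r : Int)], pvCast bB) := by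
        rw [hsplit, PySem.List.enumerate_append, List.foldl_append,
          pvSkip l1 (k : Int) (pvCast bB) hall1]
        rw [PySem.List.enumerate_cons, List.foldl_cons]
        have hcast : (k : Int) + (l1.length : Int) = (r : Int) := by
          rw [hr]; push_cast; ring
        have hstep : pvAStep ([], pvCast bB) ((k : Int) + (l1.length : Int), '{')
            = ([(k : Int) + (l1.length : Int)], pvCast bB) := by
          simp [pvAStep]
        rw [hstep, hcast]
      rw [hfind, pvOuterLoop]
      cases hm : pvMatchLoop l2 (r + 1) 1 with
      | none =>
        rw [hme.trans hm]
        rw [hfold1]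
        exact pvNoMatch l2 (r + 1) ((r : Int) + 1) 1 [(r : Int)] (pvCast bB) hm le_rfl rfl
      | some e =>
        rw [hme.trans hm]
        obtain ⟨l1', l2', hl2, hlen', hfold2⟩ :=
          pvSeg l2 (r + 1) 1 [(r : Int)] (pvCast bB) r e hm le_rfl rfl rfl
        have hre : r < e := by omega
        have hdrope : cs.drop e = l2' := by
          have h1 : cs.drop e = (cs.drop r).drop (e - r) := by
            rw [List.drop_drop]
            congr 1
            omega
          have h2 : e - r = l1'.length + 1 := by omega
          rw [h1, hdropr, h2, List.drop_succ_cons, hl2, List.drop_left]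
        have hcast1 : ((r : Int) + 1) = ((r + 1 : Nat) : Int) := by push_cast; ring
        rw [hfold1, hcast1, hfold2, pvUpd_cast bB r e hre hwf]
        have hlenle : e ≤ cs.length := by
          have := pvMatchingEnd_bounds cs r e (hme.trans hm)
          omega
        have hwf' : pvWF (pvUpdB bB r e) := pvUpdB_wf bB r e hre hwf
        rw [← hdrope]
        exact ih cs e (pvUpdB bB r e) (by omega) hwf'

-- ===== VERDICT (by name: the statement is the Claim_ definition above) =====
theorem extract_longest_object_py_spec : Claim_equal_extract_longest_object_py := by
  intro text _
  unfold Spec_extract_longest_object_py extract_longest_object_py extract_longest_object_py_alt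
  have h := pvMain text.toList.length text.toList 0 none (by omega) (by intro p hp; simp at hp)
  simp only [List.drop_zero, Nat.cast_zero, pvCast, Option.map_none] at h
  dsimp only
  rw [h]
  cases hres : pvOuterLoop text.toList (pvFindOpen text.toList 0) none with
  | none => simp
  | some b => simp
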